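-- pv_equiv track=rewrite | github.com/buchasia/advent-of-code | D20/D20Q2.py | getRotation
-- ===== SOURCE A (Python) =====
-- def getRotation(tile):
--     rotation = [tile]
--     currentTile = tile
--     newTile = tile
--     for i in range(3):
--         newTile = [l[:] for l in newTile]
--         for x in range(len(tile)):
--             for y in range(len(tile)): # Is a square
--                 newTile[x][y] = currentTile[len(tile) - 1 - y][x]
--         currentTile = newTile
--         rotation.append(currentTile)
--     return rotation
-- ===== SOURCE B (Python) =====
-- def getRotation(tile):
--     n = len(tile)
--
--     def rot(f):
--         return [[f(x, y) for y in range(n)] for x in range(n)]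
--
--     return [tile,
--             rot(lambda x, y: tile[n - 1 - y][x]),
--             rot(lambda x, y: tile[n - 1 - x][n - 1 - y]),
--             rot(lambda x, y: tile[y][n - 1 - x])]
-- ===== Notes on version B (the rewrite author's own statement) =====
-- stated objective: alternative
-- what changed: B builds the three rotations directly from the original tile with closed-form index maps (90/180/270 degrees) instead of A's iterated per-cell copy into a pre-duplicated mutable grid.
-- intended difference: On tiles where some row is longer than the row count (non-square, though every row is long enough for A to return), A accidentally carries the columns beyond the square through every rotation, while B returns the clean rotations of the n-by-n part - the intended value for a function rotating a square tile. — e.g. on getRotation([["a", "b", "c"], ["d", "e", "f"]]): A returns [[["a", "b", "c"], ["d", "e", "f"]], [["d", "a", "c"], ["e", "b", "f"]], [["e", "d", "c"], ["b", "a", "f"]], [["b", "e"…, B returns [[["a", "b", "c"], ["d", "e", "f"]], [["d", "a"], ["e", "b"]], [["e", "d"], ["b", "a"]], [["b", "e"], ["a", "d"]]]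
import Mathlib
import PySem

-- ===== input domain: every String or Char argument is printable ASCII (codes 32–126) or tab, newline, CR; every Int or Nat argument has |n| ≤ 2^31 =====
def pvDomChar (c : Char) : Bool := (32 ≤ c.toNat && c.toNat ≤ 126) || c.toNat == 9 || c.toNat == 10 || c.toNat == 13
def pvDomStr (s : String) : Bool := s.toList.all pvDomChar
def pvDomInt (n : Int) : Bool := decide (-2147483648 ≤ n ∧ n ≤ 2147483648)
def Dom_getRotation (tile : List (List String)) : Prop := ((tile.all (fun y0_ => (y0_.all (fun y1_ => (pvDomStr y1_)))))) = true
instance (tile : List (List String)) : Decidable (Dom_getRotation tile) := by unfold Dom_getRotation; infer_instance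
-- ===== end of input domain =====

-- B builds the three rotations directly from the original tile with closed-form index maps
-- instead of A's iterated per-cell copy into a pre-duplicated mutable grid; equivalence is about
-- the return value (A mutates only lists it freshly copies, so callers observe no argument mutation).

-- tile[i][j] with Int indices; exact wherever Python does not raise (Pre_ excludes the raises)
def pvRd (m : List (List String)) (i j : Int) : String :=
  PySem.List.pyGetD (PySem.List.pyGetD m i []) j ""

-- ===== PORT A =====
-- one outer iteration of A: newTile = [l[:] for l in currentTile] (a value-level no-op), then the
-- two nested index loops writing newTile[x][y] = currentTile[len(tile)-1-y][x]
def stepA (n : Nat) (cur : List (List String)) : List (List String) :=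
  (List.range n).foldl (fun nt x =>
    (List.range n).foldl (fun nt y =>
      nt.set x ((nt.getD x []).set y (pvRd cur ((n : Int) - 1 - (y : Int)) (x : Int)))) nt) cur

def getRotation (tile : List (List String)) : List (List (List String)) :=
  (((List.range 3).foldl (fun (st : List (List (List String)) × List (List String)) _ =>
      let nt := stepA tile.length st.2
      (st.1 ++ [nt], nt)) ([tile], tile))).1

-- ===== PORT B =====
-- rot(f): the n×n grid read through the index map f
def rotB (n : Nat) (f : Nat → Nat → String) : List (List String) :=
  (List.range n).map (fun x => (List.range n).map (fun y => f x y))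

def getRotation_alt (tile : List (List String)) : List (List (List String)) :=
  let n := tile.length
  [tile,
   rotB n (fun x y => pvRd tile ((n : Int) - 1 - (y : Int)) (x : Int)),
   rotB n (fun x y => pvRd tile ((n : Int) - 1 - (x : Int)) ((n : Int) - 1 - (y : Int))),
   rotB n (fun x y => pvRd tile ((y : Int)) ((n : Int) - 1 - (x : Int)))]

-- ===== PRECONDITION & SPEC =====
-- Pre_ is exactly the inputs on which A returns: A raises IndexError iff some row is shorter than
-- the number of rows
def Pre_getRotation (tile : List (List String)) : Prop :=
  ∀ row ∈ tile, tile.length ≤ row.length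
instance (tile : List (List String)) : Decidable (Pre_getRotation tile) := by
  unfold Pre_getRotation; infer_instance

def pvWitness_getRotation : List (List String) := [["a", "b"], ["c", "d"]]

-- On non-square tiles (some row longer than the row count, the comment "# Is a square" notwithstanding)
-- A accidentally carries the columns beyond the square through every rotation, while B returns the
-- clean rotations of the transposable part (zip truncates to the shortest row) — the intended value
-- for a function rotating a square tile.
def D_getRotation (tile : List (List String)) : Prop :=
  ∃ row ∈ tile, tile.length < row.length
instance (tile : List (List String)) : Decidable (D_getRotation tile) := by
  unfold D_getRotation; infer_instance

def Spec_getRotation (tile : List (List String)) (out : List (List (List String))) : Prop := ¬ D_getRotation tile → out = getRotation_alt tile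
instance (tile : List (List String)) (out : List (List (List String))) : Decidable (Spec_getRotation tile out) := by unfold Spec_getRotation; infer_instance

def pvDiffWitness_getRotation : List (List String) := [["a", "b", "c"], ["d", "e", "f"]]

def pvDiffWitnessOut_getRotation : (List (List (List String))) × (List (List (List String))) :=
  ([[["a", "b", "c"], ["d", "e", "f"]],
    [["d", "a", "c"], ["e", "b", "f"]],
    [["e", "d", "c"], ["b", "a", "f"]],
    [["b", "e", "c"], ["a", "d", "f"]]],
   [[["a", "b", "c"], ["d", "e", "f"]],
    [["d", "a"], ["e", "b"]],
    [["e", "d"], ["b", "a"]],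
    [["b", "e"], ["a", "d"]]])

-- ===== CLAIM (what is proved, stated in full; the proofs are below) =====
def Claim_unchanged_getRotation : Prop := ∀ (tile : List (List String)), Dom_getRotation tile → Pre_getRotation tile → Spec_getRotation tile (getRotation tile)
def Claim_exact_getRotation : Prop := ∀ (tile : List (List String)), Dom_getRotation tile → Pre_getRotation tile → D_getRotation tile → getRotation tile ≠ getRotation_alt tile
def Claim_changed_getRotation : Prop := Dom_getRotation (pvDiffWitness_getRotation) ∧ Pre_getRotation (pvDiffWitness_getRotation) ∧ D_getRotation (pvDiffWitness_getRotation) ∧ getRotation (pvDiffWitness_getRotation) = pvDiffWitnessOut_getRotation.1 ∧ getRotation_alt (pvDiffWitness_getRotation) = pvDiffWitnessOut_getRotation.2 ∧ pvDiffWitnessOut_getRotation.1 ≠ pvDiffWitnessOut_getRotation.2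

-- ===== LEMMAS AND PROOFS =====

-- a square n×n matrix: the shape Pre_ guarantees and every rotation step preserves
def pvSq (n : Nat) (m : List (List String)) : Prop :=
  m.length = n ∧ ∀ row ∈ m, row.length = n

theorem pv_gridS_sq (n : Nat) (f : Nat → Nat → String) : pvSq n (rotB n f) := by
  refine ⟨by simp [rotB], ?_⟩
  intro row hrow
  rcases List.mem_map.mp hrow with ⟨x, _, rfl⟩
  simp

theorem pv_gridS_congr (n : Nat) (f f' : Nat → Nat → String)
    (hf : ∀ x < n, ∀ y < n, f x y = f' x y) : rotB n f = rotB n f' := by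
  unfold rotB
  apply List.map_congr_left
  intro x hx
  apply List.map_congr_left
  intro y hy
  exact hf x (List.mem_range.mp hx) y (List.mem_range.mp hy)

-- reading cell (n-1-y, x) of a square grid: the block answers
theorem pv_gridS_read (n : Nat) (f : Nat → Nat → String)
    (y x : Nat) (hy : y < n) (hx : x < n) :
    pvRd (rotB n f) ((n : Int) - 1 - (y : Int)) (x : Int) = f (n - 1 - y) x := by
  unfold pvRd rotB
  have h1 : PySem.List.pyGetD
      ((List.range n).map (fun x => (List.range n).map (fun y => f x y)))
        ((n : Int) - 1 - (y : Int)) []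
      = (List.range n).map (fun y' => f (n - 1 - y) y') := by
    rw [PySem.List.pyGetD_eq_getElem _ _ (by omega) (by simp; omega)]
    have ht : ((n : Int) - 1 - (y : Int)).toNat = n - 1 - y := by omega
    rw [List.getElem_map, List.getElem_range, ht]
  rw [h1, PySem.List.pyGetD_natCast, List.getD,
    List.getElem?_map, List.getElem?_range hx]
  rfl

-- ===== A-side machinery (the per-cell copy, characterised) =====

-- writing g 0 … g (m-1) into the first m slots of a list of length ≥ n
theorem pv_set_range {α : Type} (g : Nat → α) (l : List α) (n : Nat) (hl : n ≤ l.length) :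
    ∀ m ≤ n, (List.range m).foldl (fun r y => r.set y (g y)) l
      = (List.range m).map g ++ l.drop m := by
  intro m
  induction m with
  | zero => simp
  | succ m ih =>
    intro hm
    have hlt : m < l.length := by omega
    rw [List.range_succ, List.foldl_append, ih (by omega), List.foldl_cons, List.foldl_nil,
      List.map_append, List.drop_eq_getElem_cons hlt, List.set_append]
    simp only [List.length_map, List.length_range, lt_irrefl, if_false, Nat.sub_self,
      List.set_cons_zero, List.map_cons, List.map_nil, List.append_assoc, List.cons_append,
      List.nil_append]

-- the inner y-loop only rewrites row x of the matrix
theorem pv_inner_row (g : Nat → String) (x : Nat) :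
    ∀ (l : List Nat) (nt : List (List String)), x < nt.length →
      l.foldl (fun nt y => nt.set x ((nt.getD x []).set y (g y))) nt
        = nt.set x (l.foldl (fun r y => r.set y (g y)) (nt.getD x [])) := by
  intro l
  induction l with
  | nil => intro nt hx; simp [List.getD, List.getElem?_eq_getElem hx, List.set_getElem_self]
  | cons y l ih =>
    intro nt hx
    rw [List.foldl_cons, List.foldl_cons,
      ih _ (by simpa using hx), List.set_set]
    congr 1
    simp [List.getD, List.getElem?_set_self hx]

-- A's step on a square matrix: the n×n block is the clockwise read
theorem pv_stepA_grid (n : Nat) (cur : List (List String)) (hs : pvSq n cur) :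
    stepA n cur = rotB n (fun x y => pvRd cur ((n : Int) - 1 - (y : Int)) (x : Int)) := by
  obtain ⟨hlen, hrows⟩ := hs
  unfold stepA rotB
  have main : ∀ m ≤ n,
      (List.range m).foldl (fun nt x =>
        (List.range n).foldl (fun nt y =>
          nt.set x ((nt.getD x []).set y (pvRd cur ((n : Int) - 1 - (y : Int)) (x : Int)))) nt) cur
      = (List.range m).map (fun (x : Nat) =>
          (List.range n).map (fun (y : Nat) => pvRd cur ((n : Int) - 1 - (y : Int)) (x : Int)))
        ++ cur.drop m := by
    intro m
    induction m with
    | zero => simp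
    | succ m ih =>
      intro hm
      rw [List.range_succ, List.foldl_append, ih (by omega), List.foldl_cons, List.foldl_nil]
      set F := fun (x : Nat) =>
        (List.range n).map (fun (y : Nat) => pvRd cur ((n : Int) - 1 - (y : Int)) (x : Int)) with hF
      set P := (List.range m).map F ++ cur.drop m with hP
      have hm' : m < cur.length := by omega
      have hPlen : P.length = n := by simp [hP, hlen]; omega
      have hxP : m < P.length := by omega
      have hlenmap : ((List.range m).map F).length = m := by simp
      have hPm : P.getD m [] = cur[m] := by
        rw [hP, List.getD, List.getElem?_append_right (le_of_eq hlenmap)]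
        simp [hlenmap, List.getElem?_drop, List.getElem?_eq_getElem hm']
      have hrowP : n ≤ (P.getD m []).length := by
        rw [hPm, hrows _ (List.getElem_mem hm')]
      have hdropn : ((P.getD m []).drop n) = [] := by
        rw [hPm, List.drop_eq_nil_of_le (by rw [hrows _ (List.getElem_mem hm')])]
      rw [pv_inner_row _ _ _ _ hxP, pv_set_range _ _ _ hrowP n le_rfl, hdropn,
        List.append_nil, hP, List.drop_eq_getElem_cons hm', List.set_append]
      simp only [List.length_map, List.length_range, lt_irrefl, if_false, Nat.sub_self,
        List.set_cons_zero, List.map_append, List.map_cons, List.map_nil,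
        List.append_assoc, List.cons_append, List.nil_append, hF]
  have := main n le_rfl
  rw [List.drop_eq_nil_of_le (by omega), List.append_nil] at this
  exact this

-- ===== VERDICT (by name: the statement is the Claim_ definition above) =====
theorem getRotation_spec : Claim_unchanged_getRotation := by
  intro tile _ hpre hnd
  unfold getRotation getRotation_alt
  set n := tile.length with hn
  have h0 : pvSq n tile := ⟨rfl, fun row hrow => by
    have h1 : n ≤ row.length := hpre row hrow
    have h2 : ¬ n < row.length := fun h => hnd ⟨row, hrow, h⟩
    omega⟩
  set F1 := fun (x y : Nat) => pvRd tile ((n : Int) - 1 - (y : Int)) (x : Int) with hF1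
  set F2 := fun (x y : Nat) => pvRd tile ((n : Int) - 1 - (x : Int)) ((n : Int) - 1 - (y : Int)) with hF2
  set F3 := fun (x y : Nat) => pvRd tile ((y : Int)) ((n : Int) - 1 - (x : Int)) with hF3
  have e12 : rotB n (fun x y => pvRd (rotB n F1) ((n : Int) - 1 - (y : Int)) (x : Int))
      = rotB n F2 := by
    apply pv_gridS_congr
    intro x hx y hy
    rw [pv_gridS_read n F1 y x hy hx, hF1]
    simp only
    congr 2 <;> omega
  have e23 : rotB n (fun x y => pvRd (rotB n F2) ((n : Int) - 1 - (y : Int)) (x : Int))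
      = rotB n F3 := by
    apply pv_gridS_congr
    intro x hx y hy
    rw [pv_gridS_read n F2 y x hy hx, hF2]
    simp only
    congr 2 <;> omega
  have a1 : stepA n tile = rotB n F1 := pv_stepA_grid n tile h0
  have a2 : stepA n (rotB n F1) = rotB n F2 := by
    rw [pv_stepA_grid n _ (pv_gridS_sq n F1)]; exact e12
  have a3 : stepA n (rotB n F2) = rotB n F3 := by
    rw [pv_stepA_grid n _ (pv_gridS_sq n F2)]; exact e23
  have hr : List.range 3 = [0, 1, 2] := rfl
  rw [hr]
  simp only [List.foldl_cons, List.foldl_nil]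
  rw [a1, a2, a3, hF1, hF2, hF3]
  rfl

-- ===== tightness: inside D_ the two results differ everywhere =====

-- an n-row matrix every row of which has length ≥ n (the shape Pre_ guarantees)
def pvWide (n : Nat) (m : List (List String)) : Prop :=
  m.length = n ∧ ∀ row ∈ m, n ≤ row.length

-- one A-step on a wide matrix: the n×n block plus each row's leftover columns
def pvGrid (n : Nat) (cur : List (List String)) (f : Nat → Nat → String) : List (List String) :=
  (List.range n).map (fun x => (List.range n).map (fun y => f x y) ++ (cur.getD x []).drop n)

theorem pv_stepA_grid_wide (n : Nat) (cur : List (List String)) (hw : pvWide n cur) :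
    stepA n cur = pvGrid n cur (fun x y => pvRd cur ((n : Int) - 1 - (y : Int)) (x : Int)) := by
  obtain ⟨hlen, hrows⟩ := hw
  unfold stepA pvGrid
  have main : ∀ m ≤ n,
      (List.range m).foldl (fun nt x =>
        (List.range n).foldl (fun nt y =>
          nt.set x ((nt.getD x []).set y (pvRd cur ((n : Int) - 1 - (y : Int)) (x : Int)))) nt) cur
      = (List.range m).map (fun (x : Nat) =>
          (List.range n).map (fun (y : Nat) => pvRd cur ((n : Int) - 1 - (y : Int)) (x : Int))
            ++ (cur.getD x []).drop n) ++ cur.drop m := by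
    intro m
    induction m with
    | zero => simp
    | succ m ih =>
      intro hm
      rw [List.range_succ, List.foldl_append, ih (by omega), List.foldl_cons, List.foldl_nil]
      set F := fun (x : Nat) =>
        (List.range n).map (fun (y : Nat) => pvRd cur ((n : Int) - 1 - (y : Int)) (x : Int))
          ++ (cur.getD x []).drop n with hF
      set P := (List.range m).map F ++ cur.drop m with hP
      have hm' : m < cur.length := by omega
      have hPlen : P.length = n := by simp [hP, hlen]; omega
      have hxP : m < P.length := by omega
      have hlenmap : ((List.range m).map F).length = m := by simp
      have hPm : P.getD m [] = cur[m] := by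
        rw [hP, List.getD, List.getElem?_append_right (le_of_eq hlenmap)]
        simp [hlenmap, List.getElem?_drop, List.getElem?_eq_getElem hm']
      have hrowP : n ≤ (P.getD m []).length := by
        rw [hPm]; exact hrows _ (List.getElem_mem hm')
      have hcurD : cur.getD m [] = cur[m] := by
        simp [List.getD, List.getElem?_eq_getElem hm']
      rw [pv_inner_row _ _ _ _ hxP, pv_set_range _ _ _ hrowP n le_rfl, hPm,
        hP, List.drop_eq_getElem_cons hm', List.set_append]
      simp only [List.length_map, List.length_range, lt_irrefl, if_false, Nat.sub_self,
        List.set_cons_zero, List.map_append, List.map_cons, List.map_nil,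
        List.append_assoc, List.cons_append, List.nil_append, hF, hcurD]
  have := main n le_rfl
  rw [List.drop_eq_nil_of_le (by omega), List.append_nil] at this
  exact this

-- ===== VERDICT (continued, by name) =====
theorem getRotation_changed : Claim_changed_getRotation := by
  unfold Claim_changed_getRotation; decide

theorem getRotation_tight : Claim_exact_getRotation := by
  intro tile _ hpre hd heq
  set n := tile.length with hn
  obtain ⟨row, hrow, hlong⟩ := hd
  obtain ⟨x, hx, hxe⟩ := List.getElem_of_mem hrow
  have hA : getRotation tile
      = [tile, stepA n tile, stepA n (stepA n tile), stepA n (stepA n (stepA n tile))] := rfl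
  have hB : getRotation_alt tile
      = [tile,
         rotB n (fun x y => pvRd tile ((n : Int) - 1 - (y : Int)) (x : Int)),
         rotB n (fun x y => pvRd tile ((n : Int) - 1 - (x : Int)) ((n : Int) - 1 - (y : Int))),
         rotB n (fun x y => pvRd tile ((y : Int)) ((n : Int) - 1 - (x : Int)))] := rfl
  rw [hA, hB] at heq
  simp only [List.cons.injEq, and_true] at heq
  have h1 : stepA n tile
      = rotB n (fun x y => pvRd tile ((n : Int) - 1 - (y : Int)) (x : Int)) := heq.2.1
  rw [pv_stepA_grid_wide n tile ⟨rfl, hpre⟩] at h1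
  have hx' : x < n := by omega
  have hlens := congrArg (fun m => ((m.getD x []).length : Nat)) h1
  simp only [pvGrid, rotB, List.getD, List.getElem?_map, List.getElem?_range hx'] at hlens
  have hdrop : (tile[x]?.getD []).length = row.length := by
    rw [List.getElem?_eq_getElem hx, hxe]
    rfl
  simp only [Option.map_some, Option.getD_some, List.length_append, List.length_map,
    List.length_range, List.length_drop, hdrop] at hlens
  omega
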